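-- pv_equiv track=rewrite | github.com/MSC72m/telegram_api_bot | telegram_api_bot/telegram_app/messenger_api/api/media_type.py | get_content_type
-- ===== SOURCE A (Python) =====
-- def get_content_type(content_type: str) -> str | None:
--     """
--     Maps a given MIME type to its corresponding content type accepted by the Telegram API.
--
--     Args:
--         content_type (str): The MIME type to be mapped.
--
--     Returns:
--         str: The corresponding content type accepted by the Telegram API, such as 'audio', 'document',
--              'photo', 'video', 'animation', 'voice', or 'web_page'. Returns None if the MIME type
--              does not match any known content type.
--
--     The function checks the provided MIME type against predefined categories:
--     - 'audio': Accepts 'audio/mpeg', 'audio/wav', 'audio/ogg', 'audio/aac'.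
--     - 'document': Accepts 'application/pdf', 'application/msword',
--                   'application/vnd.openxmlformats-officedocument.wordprocessingml.document',
--                   'application/vnd.ms-excel', 'application/vnd.openxmlformats-officedocument.spreadsheetml.sheet',
--                   'application/vnd.ms-powerpoint', 'application/vnd.openxmlformats-officedocument.presentationml.presentation'.
--     - 'photo': Accepts 'image/jpeg', 'image/png', 'image/gif', 'image/bmp', 'image/webp'.
--     - 'video': Accepts 'video/mp4', 'video/mpeg', 'video/quicktime', 'video/x-msvideo', 'video/x-ms-wmv'.
--     - 'animation': Accepts 'image/gif'.
--     - 'voice': Accepts 'audio/ogg', 'audio/mpeg', 'audio/wav'.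
--     - 'web_page': Currently accepts no MIME types.
--
--     Example:
--         content_type = "audio/mpeg"
--         result = get_content_type(content_type)
--         # result will be 'audio'
--     """
--     content_type_to_mime_type = {
--         "audio": ["audio/mpeg", "audio/wav", "audio/ogg", "audio/aac", "audio/mp3"],
--         "document": ["application/pdf", "application/msword",
--                      "application/vnd.openxmlformats-officedocument.wordprocessingml.document",
--                      "application/vnd.ms-excel", "application/vnd.openxmlformats-officedocument.spreadsheetml.sheet",
--                      "application/vnd.ms-powerpoint",
--                      "application/vnd.openxmlformats-officedocument.presentationml.presentation"],
--         "photo": ["image/jpeg", "image/png", "image/gif", "image/bmp", "image/webp"],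
--         "video": ["video/mp4", "video/mpeg", "video/quicktime", "video/x-msvideo", "video/x-ms-wmv"],
--         "animation": ["image/gif"],
--         "web_page": []
--     }
--
--     for media_type, mime_types in content_type_to_mime_type.items():
--         if content_type in mime_types:
--             return media_type
--     return None
-- ===== SOURCE B (Python) =====
-- _SUBTYPES_BY_MAJOR = {
--     "audio": ("audio", {"mpeg", "wav", "ogg", "aac", "mp3"}),
--     "application": ("document", {"pdf", "msword",
--                                  "vnd.openxmlformats-officedocument.wordprocessingml.document",
--                                  "vnd.ms-excel",
--                                  "vnd.openxmlformats-officedocument.spreadsheetml.sheet",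
--                                  "vnd.ms-powerpoint",
--                                  "vnd.openxmlformats-officedocument.presentationml.presentation"}),
--     "image": ("photo", {"jpeg", "png", "gif", "bmp", "webp"}),
--     "video": ("video", {"mp4", "mpeg", "quicktime", "x-msvideo", "x-ms-wmv"}),
-- }
--
--
-- def get_content_type(content_type: str) -> str | None:
--     slash = content_type.find("/")
--     if slash < 0:
--         return None
--     entry = _SUBTYPES_BY_MAJOR.get(content_type[:slash])
--     if entry is None:
--         return None
--     category, subtypes = entry
--     return category if content_type[slash + 1:] in subtypes else None
-- ===== Notes on version B (the rewrite author's own statement) =====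
-- stated objective: alternative
-- what changed: Instead of scanning category lists for the full MIME string, B splits the MIME type at the first slash into major/subtype, dispatches on the major type via a dict, and checks the subtype in a set; the first-match rule (image/gif -> photo) falls out because each major type maps to one category.
import Mathlib
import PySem

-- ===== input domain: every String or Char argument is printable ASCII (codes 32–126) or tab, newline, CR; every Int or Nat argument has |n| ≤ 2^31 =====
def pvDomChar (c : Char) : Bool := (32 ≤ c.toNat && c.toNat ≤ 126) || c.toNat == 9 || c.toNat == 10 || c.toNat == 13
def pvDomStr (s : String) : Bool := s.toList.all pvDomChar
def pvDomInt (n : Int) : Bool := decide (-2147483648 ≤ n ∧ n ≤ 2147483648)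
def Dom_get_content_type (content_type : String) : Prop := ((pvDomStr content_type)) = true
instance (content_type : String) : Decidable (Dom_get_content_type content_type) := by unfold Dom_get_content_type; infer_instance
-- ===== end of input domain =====

-- B parses the MIME type (major '/' subtype) and dispatches on the major type instead of
-- scanning A's category -> MIME-list table per call; same result for every input.

-- ===== PORT A =====
-- A's literal dict: category -> list of full MIME strings, in source order.
def pvContentTypeToMime : List (String × List String) :=
  [("audio", ["audio/mpeg", "audio/wav", "audio/ogg", "audio/aac", "audio/mp3"]),
   ("document", ["application/pdf", "application/msword",
                 "application/vnd.openxmlformats-officedocument.wordprocessingml.document",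
                 "application/vnd.ms-excel", "application/vnd.openxmlformats-officedocument.spreadsheetml.sheet",
                 "application/vnd.ms-powerpoint",
                 "application/vnd.openxmlformats-officedocument.presentationml.presentation"]),
   ("photo", ["image/jpeg", "image/png", "image/gif", "image/bmp", "image/webp"]),
   ("video", ["video/mp4", "video/mpeg", "video/quicktime", "video/x-msvideo", "video/x-ms-wmv"]),
   ("animation", ["image/gif"]),
   ("web_page", [])]

-- the 'for media_type, mime_types in ….items(): if content_type in mime_types: return media_type' loop
def pvLoopA : List (String × List String) → String → Option String
  | [], _ => none
  | (media_type, mime_types) :: rest, content_type =>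
      if mime_types.contains content_type then some media_type else pvLoopA rest content_type

def get_content_type (content_type : String) : Option String :=
  pvLoopA pvContentTypeToMime content_type

-- ===== PORT B =====
-- Source B's module dict: major type -> (category, set of subtypes)
def pvSubtypesByMajor : PySem.Dict String (String × PySem.Set String) :=
  PySem.Dict.ofList
    [("audio", ("audio", PySem.Set.ofList ["mpeg", "wav", "ogg", "aac", "mp3"])),
     ("application", ("document", PySem.Set.ofList ["pdf", "msword",
                      "vnd.openxmlformats-officedocument.wordprocessingml.document",
                      "vnd.ms-excel",
                      "vnd.openxmlformats-officedocument.spreadsheetml.sheet",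
                      "vnd.ms-powerpoint",
                      "vnd.openxmlformats-officedocument.presentationml.presentation"])),
     ("image", ("photo", PySem.Set.ofList ["jpeg", "png", "gif", "bmp", "webp"])),
     ("video", ("video", PySem.Set.ofList ["mp4", "mpeg", "quicktime", "x-msvideo", "x-ms-wmv"]))]

def get_content_type_alt (content_type : String) : Option String :=
  let slash := PySem.Str.find content_type "/"
  if slash < 0 then none
  else
    match PySem.Dict.get? pvSubtypesByMajor (PySem.Str.slice content_type none (some slash)) with
    | none => none
    | some (category, subtypes) =>
        if (PySem.Str.slice content_type (some (slash + 1)) none) ∈ subtypes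
        then some category else none

-- ===== PRECONDITION & SPEC =====
def Spec_get_content_type (content_type : String) (out : Option String) : Prop := out = get_content_type_alt content_type
instance (content_type : String) (out : Option String) : Decidable (Spec_get_content_type content_type out) := by unfold Spec_get_content_type; infer_instance

-- ===== CLAIM (what is proved, stated in full; the proofs are below) =====
def Claim_equal_get_content_type : Prop := ∀ (content_type : String), Dom_get_content_type content_type → Spec_get_content_type content_type (get_content_type content_type)

-- ===== LEMMAS AND PROOFS =====

-- if find finds a '/', the string splits as B's two slices around that '/'
theorem pvRecon (ct : String) (h0 : ¬ PySem.Str.find ct "/" < 0) :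
    ct.toList = (PySem.Str.slice ct none (some (PySem.Str.find ct "/"))).toList
                ++ '/' :: (PySem.Str.slice ct (some (PySem.Str.find ct "/" + 1)) none).toList := by
  have hnn : 0 ≤ PySem.Chars.find ct.toList ['/'] := by
    simpa using le_of_not_gt h0
  have hspec := (PySem.Chars.find_spec (s := ct.toList) (sub := ['/']) hnn).1
  set n := (PySem.Chars.find ct.toList ['/']).toNat with hn
  obtain ⟨t, ht⟩ := hspec
  have hdrop : ct.toList.drop n = '/' :: t := by simpa using ht.symm
  have ht' : t = ct.toList.drop (n + 1) := by
    have := congrArg List.tail hdrop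
    simpa [List.tail_drop] using this.symm
  have hfind : PySem.Str.find ct "/" = (n : Int) := by
    simp [hn]
    omega
  rw [hfind]
  have h1 : (PySem.Str.slice ct none (some (n : Int))).toList = ct.toList.take n := by
    simp [PySem.List.slice_to_natCast]
  have h2 : (PySem.Str.slice ct (some ((n : Int) + 1)) none).toList = ct.toList.drop (n + 1) := by
    simp only [PySem.Str.toList_slice, PySem.Chars.slice_eq_listSlice]
    rw [PySem.List.slice_from _ (by positivity)]
    norm_num
  rw [h1, h2, ← ht', ← hdrop, List.take_append_drop]

theorem pvMemOfToList (s : String) (L : List String) (h : s.toList ∈ L.map String.toList) : s ∈ L := by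
  obtain ⟨t, ht, he⟩ := List.mem_map.mp h
  exact (String.toList_inj.mp he.symm) ▸ ht

theorem pvAltSome (ct c : String) (h : get_content_type_alt ct = some c) :
    ct ∈ ["audio/mpeg", "audio/wav", "audio/ogg", "audio/aac", "audio/mp3",
          "application/pdf", "application/msword",
          "application/vnd.openxmlformats-officedocument.wordprocessingml.document",
          "application/vnd.ms-excel",
          "application/vnd.openxmlformats-officedocument.spreadsheetml.sheet",
          "application/vnd.ms-powerpoint",
          "application/vnd.openxmlformats-officedocument.presentationml.presentation",
          "image/jpeg", "image/png", "image/gif", "image/bmp", "image/webp",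
          "video/mp4", "video/mpeg", "video/quicktime", "video/x-msvideo", "video/x-ms-wmv"] := by
  unfold get_content_type_alt at h
  by_cases h0 : PySem.Str.find ct "/" < 0
  · rw [if_pos h0] at h
    exact absurd h (by simp)
  · rw [if_neg h0] at h
    have hrec := pvRecon ct h0
    set maj := PySem.Str.slice ct none (some (PySem.Str.find ct "/")) with hmaj
    set sub := PySem.Str.slice ct (some (PySem.Str.find ct "/" + 1)) none with hsub
    have hd : pvSubtypesByMajor = PySem.Dict.mk
      [("audio", ("audio", ["mpeg", "wav", "ogg", "aac", "mp3"])),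
       ("application", ("document", ["pdf", "msword",
                        "vnd.openxmlformats-officedocument.wordprocessingml.document",
                        "vnd.ms-excel",
                        "vnd.openxmlformats-officedocument.spreadsheetml.sheet",
                        "vnd.ms-powerpoint",
                        "vnd.openxmlformats-officedocument.presentationml.presentation"])),
       ("image", ("photo", ["jpeg", "png", "gif", "bmp", "webp"])),
       ("video", ("video", ["mp4", "mpeg", "quicktime", "x-msvideo", "x-ms-wmv"]))] := by decide
    rw [hd] at h
    simp only [PySem.Dict.get?_mk_cons] at h
    split_ifs at h with h1 h2 h3 h4
    · have hm : maj = "audio" := (eq_of_beq h1).symm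
      rw [hm] at hrec
      have h' : (if sub ∈ ["mpeg", "wav", "ogg", "aac", "mp3"] then some "audio" else (none : Option String)) = some c := h
      split_ifs at h' with hs
      · simp only [List.mem_cons, List.not_mem_nil, or_false] at hs
        apply pvMemOfToList
        rcases hs with hs|hs|hs|hs|hs <;> rw [hs] at hrec <;> rw [hrec] <;> decide
    · have hm : maj = "application" := (eq_of_beq h2).symm
      rw [hm] at hrec
      have h' : (if sub ∈ ["pdf", "msword", "vnd.openxmlformats-officedocument.wordprocessingml.document", "vnd.ms-excel", "vnd.openxmlformats-officedocument.spreadsheetml.sheet", "vnd.ms-powerpoint", "vnd.openxmlformats-officedocument.presentationml.presentation"] then some "document" else (none : Option String)) = some c := h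
      split_ifs at h' with hs
      simp only [List.mem_cons, List.not_mem_nil, or_false] at hs
      apply pvMemOfToList
      rcases hs with hs|hs|hs|hs|hs|hs|hs <;> rw [hs] at hrec <;> rw [hrec] <;> decide
    · have hm : maj = "image" := (eq_of_beq h3).symm
      rw [hm] at hrec
      have h' : (if sub ∈ ["jpeg", "png", "gif", "bmp", "webp"] then some "photo" else (none : Option String)) = some c := h
      split_ifs at h' with hs
      simp only [List.mem_cons, List.not_mem_nil, or_false] at hs
      apply pvMemOfToList
      rcases hs with hs|hs|hs|hs|hs <;> rw [hs] at hrec <;> rw [hrec] <;> decide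
    · have hm : maj = "video" := (eq_of_beq h4).symm
      rw [hm] at hrec
      have h' : (if sub ∈ ["mp4", "mpeg", "quicktime", "x-msvideo", "x-ms-wmv"] then some "video" else (none : Option String)) = some c := h
      split_ifs at h' with hs
      simp only [List.mem_cons, List.not_mem_nil, or_false] at hs
      apply pvMemOfToList
      rcases hs with hs|hs|hs|hs|hs <;> rw [hs] at hrec <;> rw [hrec] <;> decide
    · exact absurd h (by simp [PySem.Dict.get?])

-- ===== VERDICT (by name: the statement is the Claim_ definition above) =====
theorem get_content_type_spec : Claim_equal_get_content_type := by
  intro content_type _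
  unfold Spec_get_content_type
  by_cases h0 : content_type = "audio/mpeg"
  · subst h0; decide
  by_cases h1 : content_type = "audio/wav"
  · subst h1; decide
  by_cases h2 : content_type = "audio/ogg"
  · subst h2; decide
  by_cases h3 : content_type = "audio/aac"
  · subst h3; decide
  by_cases h4 : content_type = "audio/mp3"
  · subst h4; decide
  by_cases h5 : content_type = "application/pdf"
  · subst h5; decide
  by_cases h6 : content_type = "application/msword"
  · subst h6; decide
  by_cases h7 : content_type = "application/vnd.openxmlformats-officedocument.wordprocessingml.document"
  · subst h7; decide
  by_cases h8 : content_type = "application/vnd.ms-excel"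
  · subst h8; decide
  by_cases h9 : content_type = "application/vnd.openxmlformats-officedocument.spreadsheetml.sheet"
  · subst h9; decide
  by_cases h10 : content_type = "application/vnd.ms-powerpoint"
  · subst h10; decide
  by_cases h11 : content_type = "application/vnd.openxmlformats-officedocument.presentationml.presentation"
  · subst h11; decide
  by_cases h12 : content_type = "image/jpeg"
  · subst h12; decide
  by_cases h13 : content_type = "image/png"
  · subst h13; decide
  by_cases h14 : content_type = "image/gif"
  · subst h14; decide
  by_cases h15 : content_type = "image/bmp"
  · subst h15; decide
  by_cases h16 : content_type = "image/webp"
  · subst h16; decide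
  by_cases h17 : content_type = "video/mp4"
  · subst h17; decide
  by_cases h18 : content_type = "video/mpeg"
  · subst h18; decide
  by_cases h19 : content_type = "video/quicktime"
  · subst h19; decide
  by_cases h20 : content_type = "video/x-msvideo"
  · subst h20; decide
  by_cases h21 : content_type = "video/x-ms-wmv"
  · subst h21; decide
  rcases hB : get_content_type_alt content_type with _ | c
  · simp [get_content_type, pvLoopA, pvContentTypeToMime, h0, h1, h2, h3, h4, h5, h6, h7, h8, h9, h10, h11, h12, h13, h14, h15, h16, h17, h18, h19, h20, h21]
  · have := pvAltSome content_type c hB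
    simp only [List.mem_cons, List.not_mem_nil, or_false] at this
    tauto
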